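-- pv_equiv track=rewrite | github.com/bellDev-code/Challenge_Algorithm | programmers/Ohsulgi/today06/18-todayChallenge.py | solution
-- ===== SOURCE A (Python) =====
-- def solution(numlist, n):
--     distance = {}
--     for i in numlist:
--         if i not in distance:
--             distance[i] = 0
--         distance[i] = abs(n-i)
--
--     distance = sorted(distance.items(), key=lambda x: x[1])
--
--     arr = [distance[0][0]]
--     cnt = 0
--     for i in range(1, len(distance)):
--         if distance[i][1] > cnt:
--             arr.append(distance[i][0])
--             cnt = distance[i][1]
--         elif distance[i][1] == cnt:
--             if distance[i][0] > arr[-1]: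
--                 arr.insert(-1, distance[i][0])
--             elif distance[i][0] < arr[-1]:
--                 arr.append(distance[i][0])
--
--     return arr
-- ===== SOURCE B (Python) =====
-- def solution(numlist, n):
--     desc = sorted(set(numlist), reverse=True)
--     return sorted(desc, key=lambda v: abs(n - v))
-- ===== Notes on version B (the rewrite author's own statement) =====
-- stated objective: idiomatic
-- what changed: B replaces A's distance-dict rebuild plus an index scan that repairs ties with list.insert(-1, ...) by the idiomatic two-pass stable sort: sort the distinct values descending, then stably by distance, so equidistant pairs come out larger-first everywhere.
-- intended difference: When the two distinct values closest to n are equidistant and the smaller one occurs first in numlist, A leaves that first tie pair in occurrence order (smaller first, because cnt starts at 0 so the reordering branch never fires for the first group) while B puts the larger value first as it does for every other tie, which is the challenge's stated tie rule. — e.g. on solution([1, 3], 2): A returns [1, 3], B returns [3, 1]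
import Mathlib
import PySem

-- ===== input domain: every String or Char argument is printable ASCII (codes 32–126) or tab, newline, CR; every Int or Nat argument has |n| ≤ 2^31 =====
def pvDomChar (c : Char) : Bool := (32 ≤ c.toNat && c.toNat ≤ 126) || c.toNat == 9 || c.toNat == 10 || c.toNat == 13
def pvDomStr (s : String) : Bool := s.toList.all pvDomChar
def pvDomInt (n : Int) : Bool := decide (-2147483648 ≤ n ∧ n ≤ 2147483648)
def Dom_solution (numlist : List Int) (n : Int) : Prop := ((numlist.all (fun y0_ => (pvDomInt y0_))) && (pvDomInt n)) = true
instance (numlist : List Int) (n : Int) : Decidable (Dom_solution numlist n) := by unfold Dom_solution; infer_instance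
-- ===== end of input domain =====

-- B sorts the distinct values descending and then stably by distance to n (two stable sorts),
-- so every equidistant pair comes out larger-first, instead of A's distance-dict rebuild plus
-- an index scan repairing ties with list.insert(-1, …); on the first tie group A's scan keeps
-- occurrence order instead (stated as the intended difference D_ below).

-- ===== PORT A =====
-- the body of A's second for-loop; s = (arr, cnt), p = distance[i]
def solutionStep (s : List Int × Int) (p : Int × Int) : List Int × Int :=
  if p.2 > s.2 then (s.1 ++ [p.1], p.2)
  else if p.2 = s.2 then
    (if p.1 > PySem.List.pyGetD s.1 (-1) 0 then (PySem.List.insert s.1 (-1) p.1, s.2)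
     else if p.1 < PySem.List.pyGetD s.1 (-1) 0 then (s.1 ++ [p.1], s.2)
     else (s.1, s.2))
  else (s.1, s.2)

def solution (numlist : List Int) (n : Int) : List Int :=
  let distance : PySem.Dict Int Int := numlist.foldl (fun d i =>
    let d' := if d.contains i = false then d.insert i 0 else d
    d'.insert i (|n - i|)) PySem.Dict.empty
  let dist := PySem.List.sorted distance.items (fun p => p.2)
  let arr0 : List Int := [(PySem.List.pyGetD dist 0 (0, 0)).1]
  let r := (PySem.List.pyRange 1 (PySem.List.len dist)).foldl
    (fun s i => solutionStep s (PySem.List.pyGetD dist i (0, 0))) (arr0, 0)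
  r.1

-- ===== PORT B =====
def solution_alt (numlist : List Int) (n : Int) : List Int :=
  let desc := PySem.List.sorted (PySem.Set.ofList numlist) (fun v => v) true
  PySem.List.sorted desc (fun v => |n - v|)

-- ===== PRECONDITION & SPEC =====
-- Pre_ excludes only the empty list, on which A raises IndexError (distance[0][0]).
def Pre_solution (numlist : List Int) (n : Int) : Prop := numlist ≠ []
instance (numlist : List Int) (n : Int) : Decidable (Pre_solution numlist n) := by
  unfold Pre_solution; infer_instance
def pvWitness_solution : List Int × Int := ([1, 2, 3], 2)

-- When the two distinct values closest to n are equidistant and the smaller occurs first in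
-- numlist, A leaves that first tie pair in occurrence order (smaller first: cnt starts at 0, so
-- the reordering branch never fires for the first group) while B puts the larger value first as
-- for every other tie, which is the challenge's stated tie rule.
def D_solution (numlist : List Int) (n : Int) : Prop :=
  ∃ x ∈ numlist, ∃ y ∈ numlist, x < y ∧ |n - x| = |n - y| ∧
    (∀ z ∈ numlist, |n - x| ≤ |n - z|) ∧ numlist.idxOf x < numlist.idxOf y
instance (numlist : List Int) (n : Int) : Decidable (D_solution numlist n) := by
  unfold D_solution; infer_instance

def Spec_solution (numlist : List Int) (n : Int) (out : List Int) : Prop :=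
  ¬ D_solution numlist n → out = solution_alt numlist n
instance (numlist : List Int) (n : Int) (out : List Int) : Decidable (Spec_solution numlist n out) := by unfold Spec_solution; infer_instance

def pvDiffWitness_solution : List Int × Int := ([1, 3], 2)
def pvDiffWitnessOut_solution : (List Int) × (List Int) := ([1, 3], [3, 1])

-- ===== CLAIM (what is proved, stated in full; the proofs are below) =====
def Claim_unchanged_solution : Prop := ∀ (numlist : List Int) (n : Int), Dom_solution numlist n → Pre_solution numlist n → Spec_solution numlist n (solution numlist n)
def Claim_changed_solution : Prop := Dom_solution (pvDiffWitness_solution.1) (pvDiffWitness_solution.2) ∧ Pre_solution (pvDiffWitness_solution.1) (pvDiffWitness_solution.2) ∧ D_solution (pvDiffWitness_solution.1) (pvDiffWitness_solution.2) ∧ solution (pvDiffWitness_solution.1) (pvDiffWitness_solution.2) = pvDiffWitnessOut_solution.1 ∧ solution_alt (pvDiffWitness_solution.1) (pvDiffWitness_solution.2) = pvDiffWitnessOut_solution.2 ∧ pvDiffWitnessOut_solution.1 ≠ pvDiffWitnessOut_solution.2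
def Claim_exact_solution : Prop := ∀ (numlist : List Int) (n : Int), Dom_solution numlist n → Pre_solution numlist n → D_solution numlist n → solution numlist n ≠ solution_alt numlist n

-- ===== LEMMAS AND PROOFS =====

-- A's scan written as structural recursion on the sorted distinct values (proof helper)
def solutionAltGo (n : Int) (first : Bool) : List Int → List Int
  | [] => []
  | [x] => [x]
  | x :: y :: rest =>
    if |n - x| = |n - y| then
      (if first then [x, y] else [max x y, min x y]) ++ solutionAltGo n false rest
    else
      x :: solutionAltGo n false (y :: rest)

-- no three distinct integers are at the same distance to n
theorem dist3_false (n x y z : Int) (hxy : x ≠ y) (hxz : x ≠ z) (hyz : y ≠ z)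
    (h1 : |n - x| = |n - y|) (h2 : |n - x| = |n - z|) : False := by
  rcases abs_cases (n - x) with ⟨e1, _⟩ | ⟨e1, _⟩ <;>
  rcases abs_cases (n - y) with ⟨e2, _⟩ | ⟨e2, _⟩ <;>
  rcases abs_cases (n - z) with ⟨e3, _⟩ | ⟨e3, _⟩ <;> omega

-- Python's list.insert(-1, v) on a nonempty list inserts before the last element
theorem insert_neg_one_append (A : List Int) (x v : Int) :
    PySem.List.insert (A ++ [x]) (-1) v = A ++ [v, x] := by
  simp [PySem.List.insert, PySem.List.sliceIndices]

-- one iteration of A's dict-building loop on a dict of the shape it maintains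
theorem step_buildA (n i : Int) (s : List Int) :
    ((if (PySem.Dict.contains (⟨s.map (fun x => (x, |n - x|))⟩ : PySem.Dict Int Int) i) = false
      then PySem.Dict.insert (⟨s.map (fun x => (x, |n - x|))⟩ : PySem.Dict Int Int) i 0
      else (⟨s.map (fun x => (x, |n - x|))⟩ : PySem.Dict Int Int)).insert i (|n - i|))
    = ⟨(PySem.Set.add s i).map (fun x => (x, |n - x|))⟩ := by
  by_cases hi : i ∈ s
  · have hcont : (PySem.Dict.contains (⟨s.map (fun x => (x, |n - x|))⟩ : PySem.Dict Int Int) i) = true := by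
      simp [PySem.Dict.contains, List.any_eq, hi]
    rw [hcont, if_neg (by simp), PySem.Set.add_of_mem hi]
    simp only [PySem.Dict.insert, hcont, if_pos trivial]
    congr 1
    simp only [List.map_map]
    apply List.map_congr_left
    intro x _
    by_cases hx : x = i <;> simp [hx]
  · have hcont : (PySem.Dict.contains (⟨s.map (fun x => (x, |n - x|))⟩ : PySem.Dict Int Int) i) = false := by
      simp [PySem.Dict.contains, List.any_eq, hi]
    rw [hcont, if_pos rfl, PySem.Set.add_of_not_mem hi]
    have h0 : (PySem.Dict.insert (⟨s.map (fun x => (x, |n - x|))⟩ : PySem.Dict Int Int) i 0)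
        = ⟨s.map (fun x => (x, |n - x|)) ++ [(i, 0)]⟩ := by
      simp only [PySem.Dict.insert, hcont]
      simp
    rw [h0]
    have hcont2 : (PySem.Dict.contains (⟨s.map (fun x => (x, |n - x|)) ++ [(i, 0)]⟩ : PySem.Dict Int Int) i) = true := by
      simp [PySem.Dict.contains]
    simp only [PySem.Dict.insert, hcont2, if_pos trivial]
    congr 1
    simp only [List.map_append, List.map_map]
    congr 1
    · apply List.map_congr_left
      intro x hx
      have hxi : x ≠ i := fun h => hi (h ▸ hx)
      simp [hxi]
    · simp

-- A's dict holds exactly the deduplicated values paired with their distances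
theorem items_buildA (n : Int) (l : List Int) : ∀ (s : List Int),
    ((l.foldl (fun d i =>
        let d' := if d.contains i = false then d.insert i 0 else d
        d'.insert i (|n - i|)) ⟨s.map (fun x => (x, |n - x|))⟩ : PySem.Dict Int Int)).items
      = (PySem.Set.update s l).map (fun x => (x, |n - x|)) := by
  induction l with
  | nil => intro s; simp [PySem.Set.update]
  | cons i t ih =>
    intro s
    simp only [List.foldl_cons]
    rw [step_buildA n i s, PySem.Set.update_cons]
    exact ih (PySem.Set.add s i)

theorem insertBy_map {α β : Type} (f : α → β) (p : α → α → Bool) (q : β → β → Bool)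
    (h : ∀ a b, q (f a) (f b) = p a b) (x : α) : ∀ (ys : List α),
    PySem.List.insertBy q (f x) (ys.map f) = (PySem.List.insertBy p x ys).map f := by
  intro ys
  induction ys with
  | nil => simp [PySem.List.insertBy]
  | cons y t ih =>
    simp only [List.map_cons, PySem.List.insertBy, h]
    by_cases hb : p x y
    · simp [hb]
    · simp [hb, ih]

-- sorting the (x, |n-x|) pairs by second component is sorting the x's by distance
theorem sorted_map_pair (n : Int) (l : List Int) :
    PySem.List.sorted (l.map (fun x => (x, |n - x|))) (fun p => p.2)
      = (PySem.List.sorted l (fun v => |n - v|)).map (fun x => (x, |n - x|)) := by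
  rw [PySem.List.sorted_eq_foldl_insertBy, PySem.List.sorted_eq_foldl_insertBy]
  have main : ∀ (l : List Int) (acc : List Int),
      (l.map (fun x => (x, |n - x|))).foldl
        (fun a x => PySem.List.insertBy (fun p q => decide (p.2 < q.2)) x a)
        (acc.map (fun x => (x, |n - x|)))
      = (l.foldl (fun a x => PySem.List.insertBy (fun a b => decide (|n - a| < |n - b|)) x a) acc).map
          (fun x => (x, |n - x|)) := by
    intro l
    induction l with
    | nil => intro acc; simp
    | cons x t ih =>
      intro acc
      simp only [List.map_cons, List.foldl_cons]
      rw [insertBy_map (fun x => (x, |n - x|)) (fun a b => decide (|n - a| < |n - b|))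
        (fun p q => decide (p.2 < q.2)) (fun a b => rfl) x acc]
      exact ih _
  simpa using main l []

-- A's scan, resumed right after appending x with cnt = |n - x|, agrees with the pair pass
theorem scan_fresh (n : Int) : ∀ (m : Nat) (s : List Int), s.length ≤ m → ∀ (x : Int) (A : List Int),
    (x :: s).Pairwise (fun a b => |n - a| ≤ |n - b|) → (x :: s).Nodup →
    (s.foldl (fun st e => solutionStep st (e, |n - e|)) (A ++ [x], |n - x|)).1
      = A ++ solutionAltGo n false (x :: s) := by
  intro m
  induction m with
  | zero =>
    intro s hs x A _ _
    have hnil : s = [] := List.eq_nil_of_length_eq_zero (Nat.le_zero.mp hs)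
    subst hnil; simp [solutionAltGo]
  | succ m ih =>
    intro s hs x A hsort hnd
    match s with
    | [] => simp [solutionAltGo]
    | y :: t =>
      have hxy : x ≠ y := by
        intro h; subst h; exact (List.nodup_cons.mp hnd).1 (List.mem_cons_self ..)
      have hle : |n - x| ≤ |n - y| := (List.pairwise_cons.mp hsort).1 y (List.mem_cons_self ..)
      have hsort' : (y :: t).Pairwise (fun a b => |n - a| ≤ |n - b|) := (List.pairwise_cons.mp hsort).2
      have hnd' : (y :: t).Nodup := (List.nodup_cons.mp hnd).2
      rcases lt_or_eq_of_le hle with hlt | heq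
      · -- strictly larger distance: plain append, cnt updates
        have hstep : solutionStep (A ++ [x], |n - x|) (y, |n - y|) = ((A ++ [x]) ++ [y], |n - y|) := by
          simp [solutionStep, hlt]
        simp only [List.foldl_cons, hstep]
        rw [ih t (by simpa using Nat.le_of_succ_le_succ hs) y (A ++ [x]) hsort' hnd']
        simp [solutionAltGo, ne_of_lt hlt]
      · -- tie: the pair comes out as [max, min]
        have hstep : solutionStep (A ++ [x], |n - x|) (y, |n - y|)
            = (A ++ [max x y, min x y], |n - x|) := by
          rcases lt_or_gt_of_ne hxy with hyx | hyx
          · simp [solutionStep, heq, PySem.List.pyGetD_neg_one_append_singleton,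
              insert_neg_one_append, hyx, max_eq_right hyx.le, min_eq_left hyx.le]
          · simp [solutionStep, heq, PySem.List.pyGetD_neg_one_append_singleton, hyx,
              not_lt_of_gt hyx, max_eq_left hyx.le, min_eq_right hyx.le]
        simp only [List.foldl_cons, hstep]
        have haltgo : solutionAltGo n false (x :: y :: t)
            = [max x y, min x y] ++ solutionAltGo n false t := by
          simp [solutionAltGo, heq.symm]
        rw [haltgo]
        match t with
        | [] => simp [solutionAltGo]
        | z :: t' =>
          have hxz : x ≠ z := by
            intro h; subst h
            exact (List.nodup_cons.mp hnd).1 (List.mem_cons_of_mem _ (List.mem_cons_self ..))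
          have hyz : y ≠ z := by
            intro h; subst h; exact (List.nodup_cons.mp hnd').1 (List.mem_cons_self ..)
          have hzlt : |n - x| < |n - z| := by
            have h1 : |n - y| ≤ |n - z| := (List.pairwise_cons.mp hsort').1 z (List.mem_cons_self ..)
            rcases lt_or_eq_of_le (heq ▸ h1 : |n - x| ≤ |n - z|) with h | h
            · exact h
            · exact absurd h (fun h => dist3_false n x y z hxy hxz hyz heq h)
          have hstep2 : solutionStep (A ++ [max x y, min x y], |n - x|) (z, |n - z|)
              = ((A ++ [max x y, min x y]) ++ [z], |n - z|) := by
            simp [solutionStep, hzlt]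
          simp only [List.foldl_cons, hstep2]
          have hlen : t'.length ≤ m := by
            simp at hs; omega
          rw [ih t' hlen z (A ++ [max x y, min x y])
            (List.pairwise_cons.mp hsort').2 (List.nodup_cons.mp hnd').2]
          simp [List.append_assoc]

-- A's scan from the initial state (cnt = 0): the first group keeps insertion order (the quirk)
theorem scan_init (n : Int) (s : List Int) (u0 : Int)
    (hsort : (u0 :: s).Pairwise (fun a b => |n - a| ≤ |n - b|)) (hnd : (u0 :: s).Nodup) :
    (s.foldl (fun st e => solutionStep st (e, |n - e|)) ([u0], 0)).1
      = solutionAltGo n true (u0 :: s) := by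
  match s with
  | [] => simp [solutionAltGo]
  | y :: t =>
    have hu0y : u0 ≠ y := by
      intro h; subst h; exact (List.nodup_cons.mp hnd).1 (List.mem_cons_self ..)
    have hle : |n - u0| ≤ |n - y| := (List.pairwise_cons.mp hsort).1 y (List.mem_cons_self ..)
    have hypos : 0 < |n - y| := by
      rcases lt_or_eq_of_le (abs_nonneg (n - y)) with h | h
      · exact h
      · exfalso
        have hy : n - y = 0 := abs_eq_zero.mp h.symm
        have hu : n - u0 = 0 := abs_eq_zero.mp (le_antisymm (h ▸ hle) (abs_nonneg _))
        exact hu0y (by omega)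
    have hstep : solutionStep ([u0], 0) (y, |n - y|) = ([u0] ++ [y], |n - y|) := by
      simp [solutionStep, hypos]
    simp only [List.foldl_cons, hstep]
    rw [scan_fresh n t.length t le_rfl y [u0]
      (List.pairwise_cons.mp hsort).2 (List.nodup_cons.mp hnd).2]
    by_cases htie : |n - u0| = |n - y|
    · -- first-group quirk: the pair stays in insertion order
      have haltT : solutionAltGo n true (u0 :: y :: t) = [u0, y] ++ solutionAltGo n false t := by
        simp [solutionAltGo, htie]
      rw [haltT]
      match t with
      | [] => simp [solutionAltGo]
      | z :: t' =>
        have hyz : y ≠ z := by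
          intro h; subst h; exact (List.nodup_cons.mp (List.nodup_cons.mp hnd).2).1 (List.mem_cons_self ..)
        have hu0z : u0 ≠ z := by
          intro h; subst h
          exact (List.nodup_cons.mp hnd).1 (List.mem_cons_of_mem _ (List.mem_cons_self ..))
        have hne : ¬ (|n - y| = |n - z|) := by
          intro h
          exact dist3_false n u0 y z hu0y hu0z hyz htie (htie.trans h)
        simp [solutionAltGo, hne]
    · have haltT : solutionAltGo n true (u0 :: y :: t) = u0 :: solutionAltGo n false (y :: t) := by
        simp [solutionAltGo, htie]
      rw [haltT]; rfl

-- A equals the pair pass over u := sorted(set(numlist), key=distance) (stable)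
theorem solution_eq_go (numlist : List Int) (n : Int) (hpre : numlist ≠ []) :
    solution numlist n
      = solutionAltGo n true (PySem.List.sorted (PySem.Set.ofList numlist) (fun v => |n - v|)) := by
  have hitems : ((numlist.foldl (fun d i =>
      let d' := if d.contains i = false then d.insert i 0 else d
      d'.insert i (|n - i|)) PySem.Dict.empty : PySem.Dict Int Int)).items
      = (PySem.Set.ofList numlist).map (fun x => (x, |n - x|)) := by
    have := items_buildA n numlist []
    simpa [PySem.Set.update_nil_left] using this
  set u := PySem.List.sorted (PySem.Set.ofList numlist) (fun v => |n - v|) with hu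
  have hdist : PySem.List.sorted ((PySem.Set.ofList numlist).map (fun x => (x, |n - x|))) (fun p => p.2)
      = u.map (fun x => (x, |n - x|)) := sorted_map_pair n _
  have hune : u ≠ [] := by
    intro h
    rw [PySem.List.sorted_eq_nil_iff] at h
    rcases numlist with _ | ⟨a, t⟩
    · exact hpre rfl
    · have : a ∈ PySem.Set.ofList (a :: t) := (PySem.Set.mem_ofList (a :: t) a).mpr (List.mem_cons_self ..)
      simp [h] at this
  obtain ⟨u0, rest, hcons⟩ := List.exists_cons_of_ne_nil hune
  have hsortp : (u0 :: rest).Pairwise (fun a b => |n - a| ≤ |n - b|) := by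
    rw [← hcons]; exact PySem.List.sorted_pairwise _ _
  have hnd : (u0 :: rest).Nodup := by
    rw [← hcons]
    exact (PySem.List.sorted_perm (PySem.Set.ofList numlist) (fun v => |n - v|) false).symm.nodup
      (PySem.Set.nodup_ofList numlist)
  simp only [solution, hitems, hdist]
  rw [hcons]
  simp only [List.map_cons, PySem.List.pyGetD_zero_cons]
  rw [PySem.List.len_eq, show ((((u0, |n - u0|) :: rest.map (fun x => (x, |n - x|))).length : Int))
      = PySem.List.len ((u0, |n - u0|) :: rest.map (fun x => (x, |n - x|))) from rfl]
  rw [PySem.List.foldl_pyRange_pyGetD _ (0, 0) solutionStep ([u0], 0) (by norm_num : (0:Int) ≤ 1)]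
  simp only [Int.toNat_one, List.drop_succ_cons, List.drop_zero]
  rw [List.foldl_map]
  exact scan_init n rest u0 hsortp hnd

-- strict "distance first, then rank" order; a stable sort by d of a list strictly increasing in ρ
-- is pairwise dS
def dS (d ρ : Int → Int) (a b : Int) : Prop := d a < d b ∨ (d a = d b ∧ ρ a < ρ b)

theorem stable_insert (d ρ : Int → Int) (x : Int) : ∀ (acc : List Int),
    acc.Pairwise (dS d ρ) → (∀ y ∈ acc, ρ y < ρ x) →
    (PySem.List.insertBy (fun a b => decide (d a < d b)) x acc).Pairwise (dS d ρ) := by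
  intro acc
  induction acc with
  | nil => intro _ _; simp [PySem.List.insertBy]
  | cons y ys ih =>
    intro hpw hρ
    rw [List.pairwise_cons] at hpw
    by_cases hb : d x < d y
    · have : PySem.List.insertBy (fun a b => decide (d a < d b)) x (y :: ys) = x :: y :: ys := by
        simp [PySem.List.insertBy, hb]
      rw [this, List.pairwise_cons]
      refine ⟨?_, List.pairwise_cons.mpr hpw⟩
      intro z hz
      rcases List.mem_cons.mp hz with rfl | hz'
      · exact Or.inl hb
      · rcases hpw.1 z hz' with h | h
        · exact Or.inl (lt_trans hb h)
        · exact Or.inl (h.1 ▸ hb)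
    · have : PySem.List.insertBy (fun a b => decide (d a < d b)) x (y :: ys)
          = y :: PySem.List.insertBy (fun a b => decide (d a < d b)) x ys := by
        simp [PySem.List.insertBy, hb]
      rw [this, List.pairwise_cons]
      constructor
      · intro z hz
        rcases (PySem.List.mem_insertBy _ _ _ _).mp hz with rfl | hz'
        · rcases lt_or_eq_of_le (not_lt.mp hb) with h | h
          · exact Or.inl h
          · exact Or.inr ⟨h, hρ y (List.mem_cons_self ..)⟩
        · exact hpw.1 z hz'
      · exact ih hpw.2 (fun z hz => hρ z (List.mem_cons_of_mem _ hz))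

theorem stable_fold (d ρ : Int → Int) : ∀ (l acc : List Int), acc.Pairwise (dS d ρ) →
    (∀ y ∈ acc, ∀ x ∈ l, ρ y < ρ x) → l.Pairwise (fun a b => ρ a < ρ b) →
    (l.foldl (fun acc x => PySem.List.insertBy (fun a b => decide (d a < d b)) x acc) acc).Pairwise (dS d ρ) := by
  intro l
  induction l with
  | nil => intro acc h _ _; simpa using h
  | cons x t ih =>
    intro acc hpw hρ hl
    rw [List.pairwise_cons] at hl
    simp only [List.foldl_cons]
    apply ih
    · exact stable_insert d ρ x acc hpw (fun y hy => hρ y hy x (List.mem_cons_self ..))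
    · intro y hy x' hx'
      rcases (PySem.List.mem_insertBy _ _ _ _).mp hy with rfl | hy'
      · exact hl.1 x' hx'
      · exact hρ y hy' x' (List.mem_cons_of_mem _ hx')
    · exact hl.2

theorem sorted_pairwise_dS (d ρ : Int → Int) (l : List Int)
    (h : l.Pairwise (fun a b => ρ a < ρ b)) :
    (PySem.List.sorted l d).Pairwise (dS d ρ) := by
  rw [PySem.List.sorted_eq_foldl_insertBy]
  exact stable_fold d ρ l [] (by simp) (by simp) h

-- set(xs) lists the distinct values in first-occurrence order of xs
theorem pairwise_idxOf_ofList (xs : List Int) :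
    (PySem.Set.ofList xs).Pairwise (fun a b => ((xs.idxOf a : Int) < (xs.idxOf b : Int))) := by
  induction xs using List.reverseRecOn with
  | nil => simp
  | append_singleton xs c ih =>
    rw [PySem.Set.ofList_append_singleton]
    have hidx : ∀ a ∈ PySem.Set.ofList xs, (xs ++ [c]).idxOf a = xs.idxOf a := by
      intro a ha
      exact List.idxOf_append_of_mem ((PySem.Set.mem_ofList xs a).mp ha)
    by_cases hc : c ∈ PySem.Set.ofList xs
    · rw [PySem.Set.add_of_mem hc]
      refine ih.imp_of_mem ?_
      intro a b ha hb h
      rwa [hidx a ha, hidx b hb]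
    · rw [PySem.Set.add_of_not_mem hc]
      rw [List.pairwise_append]
      refine ⟨ih.imp_of_mem (fun {a b} ha hb h => by rwa [hidx a ha, hidx b hb]), by simp, ?_⟩
      intro a ha b hb
      rcases List.mem_singleton.mp hb with rfl
      have hcm : b ∉ xs := fun h => hc ((PySem.Set.mem_ofList xs b).mpr h)
      have hbidx : (xs ++ [b]).idxOf b = xs.length := by
        rw [List.idxOf_append]
        simp [hcm]
      have ham : a ∈ xs := (PySem.Set.mem_ofList xs a).mp ha
      rw [hidx a ha, hbidx]
      exact_mod_cast List.idxOf_lt_length_of_mem ham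

-- the descending value sort is strictly decreasing, i.e. strictly increasing in rank -v
theorem desc_pairwise_rank (numlist : List Int) :
    (PySem.List.sorted (PySem.Set.ofList numlist) (fun v => v) true).Pairwise
      (fun a b => -a < -b) := by
  have h1 := PySem.List.sorted_pairwise_rev (PySem.Set.ofList numlist) (fun v => v)
  have h2 : (PySem.List.sorted (PySem.Set.ofList numlist) (fun v => v) true).Nodup :=
    (PySem.List.sorted_perm (PySem.Set.ofList numlist) (fun v => v) true).symm.nodup
      (PySem.Set.nodup_ofList numlist)
  have := h1.and h2
  refine this.imp ?_
  rintro a b ⟨hle, hne⟩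
  omega

-- the lexicographic (distance, -value) key
def keyL (n v : Int) : Lex (Int × Int) := toLex (|n - v|, -v)

theorem keyL_lt_iff (n a b : Int) :
    keyL n a < keyL n b ↔ dS (fun v => |n - v|) (fun v => -v) a b := by
  simp [keyL, Prod.Lex.lt_iff, dS]

theorem keyL_inj (n : Int) : Function.Injective (keyL n) := by
  intro a b h
  have : ((|n - a|, -a) : Int × Int) = (|n - b|, -b) := congrArg ofLex h
  have := congrArg Prod.snd this
  omega

-- B's port is pairwise in the lexicographic order
theorem solution_alt_pairwise (numlist : List Int) (n : Int) :
    (solution_alt numlist n).Pairwise (dS (fun v => |n - v|) (fun v => -v)) := by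
  unfold solution_alt
  exact sorted_pairwise_dS _ _ _ (desc_pairwise_rank numlist)

theorem solution_alt_perm (numlist : List Int) (n : Int) :
    (solution_alt numlist n).Perm (PySem.Set.ofList numlist) := by
  unfold solution_alt
  exact (PySem.List.sorted_perm _ _ _).trans (PySem.List.sorted_perm _ _ _)

-- the pair pass permutes its input
theorem altGo_perm (n : Int) : ∀ (m : Nat) (first : Bool) (l : List Int), l.length ≤ m →
    (solutionAltGo n first l).Perm l := by
  intro m
  induction m with
  | zero =>
    intro first l hl
    have : l = [] := List.eq_nil_of_length_eq_zero (Nat.le_zero.mp hl)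
    subst this; simp [solutionAltGo]
  | succ m ih =>
    intro first l hl
    match l with
    | [] => simp [solutionAltGo]
    | [x] => simp [solutionAltGo]
    | x :: y :: rest =>
      simp only [solutionAltGo]
      by_cases htie : |n - x| = |n - y|
      · rw [if_pos htie]
        have hrest : (solutionAltGo n false rest).Perm rest :=
          ih false rest (by simp at hl; omega)
        have hpair : (if first then [x, y] else [max x y, min x y]).Perm [x, y] := by
          cases first
          · simp only [if_neg (Bool.false_ne_true)]
            rcases le_total x y with h | h
            · rw [max_eq_right h, min_eq_left h]
              exact List.Perm.swap x y []
            · rw [max_eq_left h, min_eq_right h]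
          · simp
        calc ((if first then [x, y] else [max x y, min x y]) ++ solutionAltGo n false rest).Perm
              ([x, y] ++ rest) := hpair.append hrest
          _ = x :: y :: rest := rfl
      · rw [if_neg htie]
        exact (ih false (y :: rest) (by simp at hl ⊢; omega)).cons x
  termination_by m => m

-- the pair pass of a distance-sorted duplicate-free list is pairwise lexicographic
theorem altGo_pairwise (n : Int) : ∀ (m : Nat) (l : List Int), l.length ≤ m →
    l.Pairwise (fun a b => |n - a| ≤ |n - b|) → l.Nodup →
    (solutionAltGo n false l).Pairwise (dS (fun v => |n - v|) (fun v => -v)) := by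
  intro m
  induction m with
  | zero =>
    intro l hl _ _
    have : l = [] := List.eq_nil_of_length_eq_zero (Nat.le_zero.mp hl)
    subst this; simp [solutionAltGo]
  | succ m ih =>
    intro l hl hsort hnd
    match l with
    | [] => simp [solutionAltGo]
    | [x] => simp [solutionAltGo]
    | x :: y :: rest =>
      have hxy : x ≠ y := by
        intro h; subst h; exact (List.nodup_cons.mp hnd).1 (List.mem_cons_self ..)
      have hsort' := (List.pairwise_cons.mp hsort).2
      have hx := (List.pairwise_cons.mp hsort).1
      have hnd' := (List.nodup_cons.mp hnd).2
      simp only [solutionAltGo, if_neg (Bool.false_ne_true)]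
      by_cases htie : |n - x| = |n - y|
      · rw [if_pos htie]
        have hrec := ih rest (by simp at hl; omega) (List.pairwise_cons.mp hsort').2
          (List.nodup_cons.mp hnd').2
        have hmemr : ∀ z ∈ solutionAltGo n false rest, z ∈ rest := by
          intro z hz
          exact (altGo_perm n rest.length false rest le_rfl).mem_iff.mp hz
        have hzlt : ∀ z ∈ rest, |n - x| < |n - z| := by
          intro z hz
          have hxz : x ≠ z := by
            intro h; subst h
            exact (List.nodup_cons.mp hnd).1 (List.mem_cons_of_mem _ hz)
          have hyz : y ≠ z := by
            intro h; subst h; exact (List.nodup_cons.mp hnd').1 hz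
          have h1 : |n - y| ≤ |n - z| := (List.pairwise_cons.mp hsort').1 z hz
          rcases lt_or_eq_of_le (htie ▸ h1 : |n - x| ≤ |n - z|) with h | h
          · exact h
          · exact absurd h (fun h => dist3_false n x y z hxy hxz hyz htie h)
        rw [List.pairwise_append]
        refine ⟨?_, hrec, ?_⟩
        · -- [max, min] is pairwise
          rw [List.pairwise_cons]
          refine ⟨?_, by simp⟩
          intro z hz
          rcases List.mem_singleton.mp hz with rfl
          right
          constructor
          · rcases le_total x y with h | h
            · rw [max_eq_right h, min_eq_left h]; exact htie.symm
            · rw [max_eq_left h, min_eq_right h]; exact htie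
          · rcases lt_or_gt_of_ne hxy with h | h <;> simp [max_eq_right, max_eq_left,
              min_eq_left, min_eq_right, h.le] <;> omega
        · intro a ha b hb
          have hb' := hmemr b hb
          have hda : |n - a| = |n - x| := by
            rcases List.mem_cons.mp ha with rfl | ha'
            · rcases le_total x y with h | h
              · rw [max_eq_right h]; exact htie.symm
              · rw [max_eq_left h]
            · rcases List.mem_singleton.mp ha' with rfl
              rcases le_total x y with h | h
              · rw [min_eq_left h]
              · rw [min_eq_right h]; exact htie.symm
          refine Or.inl ?_
          rw [show ((fun v => |n - v|) a) = |n - a| from rfl, hda]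
          exact hzlt b hb'
      · rw [if_neg htie]
        rw [List.pairwise_cons]
        constructor
        · intro z hz
          have hz' : z ∈ y :: rest :=
            (altGo_perm n (y :: rest).length false (y :: rest) le_rfl).mem_iff.mp hz
          left
          have h1 : |n - x| ≤ |n - z| := hx z hz'
          rcases lt_or_eq_of_le h1 with h | h
          · exact h
          · exfalso
            rcases List.mem_cons.mp hz' with rfl | hz''
            · exact htie h
            · have h2 : |n - y| ≤ |n - z| := (List.pairwise_cons.mp hsort').1 z hz''
              have h3 : |n - x| ≤ |n - y| := hx y (List.mem_cons_self ..)
              exact htie (by omega)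
        · exact ih (y :: rest) (by simp at hl ⊢; omega) hsort' hnd'
  termination_by m => m

-- distance-sorted distinct values: nonempty, pairwise, duplicate-free
theorem u_perm (numlist : List Int) (n : Int) :
    (PySem.List.sorted (PySem.Set.ofList numlist) (fun v => |n - v|)).Perm
      (PySem.Set.ofList numlist) :=
  PySem.List.sorted_perm _ _ _

theorem u_nodup (numlist : List Int) (n : Int) :
    (PySem.List.sorted (PySem.Set.ofList numlist) (fun v => |n - v|)).Nodup :=
  (u_perm numlist n).symm.nodup (PySem.Set.nodup_ofList numlist)

theorem u_ne_nil (numlist : List Int) (n : Int) (hpre : numlist ≠ []) :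
    PySem.List.sorted (PySem.Set.ofList numlist) (fun v => |n - v|) ≠ [] := by
  intro h
  rw [PySem.List.sorted_eq_nil_iff] at h
  rcases numlist with _ | ⟨a, t⟩
  · exact hpre rfl
  · have : a ∈ PySem.Set.ofList (a :: t) := (PySem.Set.mem_ofList (a :: t) a).mpr (List.mem_cons_self ..)
    simp [h] at this

theorem mem_u_iff (numlist : List Int) (n : Int) (z : Int) :
    z ∈ PySem.List.sorted (PySem.Set.ofList numlist) (fun v => |n - v|) ↔ z ∈ numlist := by
  rw [PySem.List.mem_sorted]
  exact PySem.Set.mem_ofList numlist z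

-- the stable distance sort is pairwise in (distance, first-occurrence index)
theorem u_pairwise_idx (numlist : List Int) (n : Int) :
    (PySem.List.sorted (PySem.Set.ofList numlist) (fun v => |n - v|)).Pairwise
      (dS (fun v => |n - v|) (fun v => (numlist.idxOf v : Int))) :=
  sorted_pairwise_dS _ _ _ (pairwise_idxOf_ofList numlist)

-- the pair pass (not in first-group state) computes B
theorem altGo_false_eq_alt (numlist : List Int) (n : Int) :
    solutionAltGo n false (PySem.List.sorted (PySem.Set.ofList numlist) (fun v => |n - v|))
      = solution_alt numlist n := by
  set u := PySem.List.sorted (PySem.Set.ofList numlist) (fun v => |n - v|) with hu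
  apply PySem.List.eq_of_perm_of_pairwise_le_of_injective (keyL n) (keyL_inj n)
  · exact ((altGo_perm n u.length false u le_rfl).trans (u_perm numlist n)).trans
      (solution_alt_perm numlist n).symm
  · refine (altGo_pairwise n u.length u le_rfl (PySem.List.sorted_pairwise _ _)
      (u_nodup numlist n)).imp ?_
    intro a b h
    exact le_of_lt ((keyL_lt_iff n a b).mpr h)
  · refine (solution_alt_pairwise numlist n).imp ?_
    intro a b h
    exact le_of_lt ((keyL_lt_iff n a b).mpr h)

-- outside D_, the first-group state makes no difference
theorem altGo_true_eq_false (numlist : List Int) (n : Int) (hnd : ¬ D_solution numlist n) :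
    solutionAltGo n true (PySem.List.sorted (PySem.Set.ofList numlist) (fun v => |n - v|))
      = solutionAltGo n false (PySem.List.sorted (PySem.Set.ofList numlist) (fun v => |n - v|)) := by
  rcases hm : PySem.List.sorted (PySem.Set.ofList numlist) (fun v => |n - v|) with _ | ⟨x, _ | ⟨y, rest⟩⟩
  · rfl
  · rfl
  · by_cases htie : |n - x| = |n - y|
    · have hxmem : x ∈ numlist := (mem_u_iff numlist n x).mp (by rw [hm]; exact List.mem_cons_self ..)
      have hymem : y ∈ numlist := (mem_u_iff numlist n y).mp
        (by rw [hm]; exact List.mem_cons_of_mem _ (List.mem_cons_self ..))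
      have hxy : x ≠ y := by
        have hnodup := u_nodup numlist n
        rw [hm] at hnodup
        intro h; subst h; exact (List.nodup_cons.mp hnodup).1 (List.mem_cons_self ..)
      have hidx : (numlist.idxOf x : Int) < (numlist.idxOf y : Int) := by
        have hpw := u_pairwise_idx numlist n
        rw [hm] at hpw
        rcases (List.pairwise_cons.mp hpw).1 y (List.mem_cons_self ..) with h | h
        · exact absurd htie (ne_of_lt h)
        · exact h.2
      have hyx : y < x := by
        rcases lt_trichotomy x y with h | h | h
        · exfalso
          apply hnd
          refine ⟨x, hxmem, y, hymem, h, htie, ?_, by exact_mod_cast hidx⟩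
          intro z hz
          exact PySem.List.key_head_sorted_le (PySem.Set.ofList numlist) (fun v => |n - v|)
            hm z ((PySem.Set.mem_ofList numlist z).mpr hz)
        · exact absurd h hxy
        · exact h
      simp [solutionAltGo, htie, max_eq_left hyx.le, min_eq_right hyx.le]
    · simp [solutionAltGo, htie]

-- the pair pass in first-group state starts with the head of its input
theorem altGo_true_head (n x : Int) (t : List Int) :
    (solutionAltGo n true (x :: t)).head? = some x := by
  match t with
  | [] => simp [solutionAltGo]
  | y :: t' =>
    simp only [solutionAltGo]
    by_cases htie : |n - x| = |n - y| <;> simp [htie]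

-- ===== VERDICT (by name: the statement is the Claim_ definition above) =====
theorem solution_spec : Claim_unchanged_solution := by
  intro numlist n _hdom hpre
  unfold Spec_solution
  intro hnd
  rw [solution_eq_go numlist n hpre, altGo_true_eq_false numlist n hnd,
    altGo_false_eq_alt numlist n]
theorem solution_changed : Claim_changed_solution := by
  unfold Claim_changed_solution; decide
theorem solution_tight : Claim_exact_solution := by
  intro numlist n _hdom hpre hD heq
  obtain ⟨x, hxmem, y, hymem, hxy, htie, hmin, hidx⟩ := hD
  rcases hm : PySem.List.sorted (PySem.Set.ofList numlist) (fun v => |n - v|) with _ | ⟨h0, t⟩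
  · exact u_ne_nil numlist n hpre hm
  · -- the head of A's sorted order is x
    have hh0mem : h0 ∈ numlist := (mem_u_iff numlist n h0).mp (by rw [hm]; exact List.mem_cons_self ..)
    have hxu : x ∈ h0 :: t := by rw [← hm]; exact (mem_u_iff numlist n x).mpr hxmem
    have hd0 : |n - h0| ≤ |n - x| :=
      PySem.List.key_head_sorted_le (PySem.Set.ofList numlist) (fun v => |n - v|) hm x
        ((PySem.Set.mem_ofList numlist x).mpr hxmem)
    have hdeq : |n - h0| = |n - x| := le_antisymm hd0 (hmin h0 hh0mem)
    have hh0x : h0 = x := by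
      by_cases hx : h0 = x
      · exact hx
      by_cases hy : h0 = y
      · exfalso
        have hxt : x ∈ t := by
          rcases List.mem_cons.mp hxu with h | h
          · exact absurd h.symm hx
          · exact h
        have hpw := u_pairwise_idx numlist n
        rw [hm] at hpw
        rcases (List.pairwise_cons.mp hpw).1 x hxt with h | h
        · have h1 : |n - h0| < |n - x| := h
          omega
        · have h2 : (numlist.idxOf y : Int) < (numlist.idxOf x : Int) := by
            rw [← hy]; exact h.2
          omega
      · exact (dist3_false n x y h0 hxy.ne (fun e => hx e.symm) (fun e => hy e.symm)
          htie hdeq.symm).elim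
    have headA : (solution numlist n).head? = some x := by
      rw [solution_eq_go numlist n hpre, hm, hh0x]
      exact altGo_true_head n x t
    -- the head of B's result is y
    have hyB : y ∈ solution_alt numlist n :=
      (solution_alt_perm numlist n).mem_iff.mpr ((PySem.Set.mem_ofList numlist y).mpr hymem)
    rcases hB : solution_alt numlist n with _ | ⟨b0, bt⟩
    · rw [hB] at hyB; exact absurd hyB (List.not_mem_nil)
    · have hb0mem : b0 ∈ numlist := by
        have hb0B : b0 ∈ solution_alt numlist n := by rw [hB]; exact List.mem_cons_self ..
        exact (PySem.Set.mem_ofList numlist b0).mp ((solution_alt_perm numlist n).mem_iff.mp hb0B)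
      have hb0y : b0 = y := by
        by_cases hb : b0 = y
        · exact hb
        exfalso
        have hyt : y ∈ bt := by
          rw [hB] at hyB
          rcases List.mem_cons.mp hyB with h | h
          · exact absurd h.symm hb
          · exact h
        have hpwB := solution_alt_pairwise numlist n
        rw [hB] at hpwB
        have hdxb : |n - x| ≤ |n - b0| := hmin b0 hb0mem
        rcases (List.pairwise_cons.mp hpwB).1 y hyt with h | h
        · have h1 : |n - b0| < |n - y| := h
          omega
        · have hdb : |n - b0| = |n - y| := h.1
          by_cases hbx : b0 = x
          · have h3 : -x < -y := by rw [← hbx]; exact h.2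
            omega
          · exact dist3_false n x y b0 hxy.ne (fun e => hbx e.symm) (fun e => hb e.symm) htie
              (by omega)
      have headB : (solution_alt numlist n).head? = some y := by
        rw [hB, hb0y]; rfl
      rw [heq, headB] at headA
      have hfin : x = y := by injection headA with h; exact h.symm
      omega
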